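-- pv_equiv track=rewrite | github.com/StivenPabloJimenezCastillo/Ape_3_automatas | nodeterministas/problema_8.py | ndt
-- ===== SOURCE A (Python) =====
-- def ndt(adn):
--     estados = {"q0"}
--
--     for simbolo in adn:
--         nuevo_estado = set()
--
--         for estado in estados:
--             if estado == "q0":
--                 if simbolo.lower() == "k":
--                     nuevo_estado.add("q1")
--
--             elif estado == "q1":
--                 if simbolo.lower() == "g":
--                     nuevo_estado.add("q2")
--
--             elif estado == "q2":
--                 if simbolo.lower() == "x":
--                     nuevo_estado.update(["q2", "q3"])
--                 elif simbolo.lower() == "f":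
--                     nuevo_estado.add("q4")
--
--             elif estado == "q3":
--                 if simbolo.lower() == "f":
--                     nuevo_estado.add("q4")
--
--         estados = nuevo_estado
--
--     return "q4" in estados
-- ===== SOURCE B (Python) =====
-- def ndt(adn):
--     s = adn.lower()
--     return len(s) >= 3 and s.startswith("kg") and s.endswith("f") and all(c == "x" for c in s[2:-1])
-- ===== Notes on version B (the rewrite author's own statement) =====
-- stated objective: simpler
-- what changed: Replaces the per-symbol NFA subset simulation with a one-line closed-form pattern test: the language is exactly 'kg' + 'x'* + 'f' case-insensitively, checked with lower/startswith/endswith and a scan of the middle slice.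
import Mathlib
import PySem

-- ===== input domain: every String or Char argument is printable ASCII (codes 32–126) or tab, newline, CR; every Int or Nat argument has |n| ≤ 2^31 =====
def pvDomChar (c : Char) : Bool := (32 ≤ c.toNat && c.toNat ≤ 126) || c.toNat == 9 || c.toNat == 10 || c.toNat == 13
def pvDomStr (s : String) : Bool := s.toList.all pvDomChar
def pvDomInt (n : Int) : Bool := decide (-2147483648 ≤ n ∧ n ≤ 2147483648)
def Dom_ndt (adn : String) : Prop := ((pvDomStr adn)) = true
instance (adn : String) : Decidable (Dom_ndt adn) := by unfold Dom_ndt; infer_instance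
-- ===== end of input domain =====

-- B replaces the NFA subset simulation by a closed-form pattern test ('kg' + 'x'* + 'f', case-insensitive) on the lowered string (objective: simpler).
-- ===== PORT A =====
def ndtStepA (estados : PySem.Set String) (c : Char) : PySem.Set String :=
  estados.foldl (fun nuevo estado =>
    if estado == "q0" then
      (if PySem.Chars.lowerChar c == 'k' then PySem.Set.add nuevo "q1" else nuevo)
    else if estado == "q1" then
      (if PySem.Chars.lowerChar c == 'g' then PySem.Set.add nuevo "q2" else nuevo)
    else if estado == "q2" then
      (if PySem.Chars.lowerChar c == 'x' then PySem.Set.update nuevo ["q2", "q3"]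
       else if PySem.Chars.lowerChar c == 'f' then PySem.Set.add nuevo "q4" else nuevo)
    else if estado == "q3" then
      (if PySem.Chars.lowerChar c == 'f' then PySem.Set.add nuevo "q4" else nuevo)
    else nuevo) PySem.Set.empty

def ndt (adn : String) : Bool :=
  PySem.Set.contains (adn.toList.foldl ndtStepA (PySem.Set.ofList ["q0"])) "q4"

-- ===== PORT B =====
def ndt_alt (adn : String) : Bool :=
  let s := PySem.Str.lower adn
  decide (3 ≤ PySem.Str.len s) && PySem.Str.startswith s "kg" && PySem.Str.endswith s "f"
    && (PySem.Str.slice s (some 2) (some (-1))).toList.all (fun c => c == 'x')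

-- ===== PRECONDITION & SPEC =====
def Spec_ndt (adn : String) (out : Bool) : Prop := out = ndt_alt adn
instance (adn : String) (out : Bool) : Decidable (Spec_ndt adn out) := by unfold Spec_ndt; infer_instance

-- ===== CLAIM (what is proved, stated in full; the proofs are below) =====
def Claim_equal_ndt : Prop := ∀ (adn : String), Dom_ndt adn → Spec_ndt adn (ndt adn)

-- ===== LEMMAS AND PROOFS =====

-- Acceptance of A's NFA from each reachable state set, as recursive predicates on the remaining input.
def accQ2 : List Char → Bool
  | [] => false
  | c :: r =>
    if PySem.Chars.lowerChar c = 'f' then r.isEmpty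
    else if PySem.Chars.lowerChar c = 'x' then accQ2 r
    else false

def accQ1 : List Char → Bool
  | [] => false
  | c :: r => if PySem.Chars.lowerChar c = 'g' then accQ2 r else false

def accQ0 : List Char → Bool
  | [] => false
  | c :: r => if PySem.Chars.lowerChar c = 'k' then accQ1 r else false

theorem foldl_dead (l : List Char) :
    l.foldl ndtStepA ([] : PySem.Set String) = [] := by
  induction l with
  | nil => rfl
  | cons c r ih => simpa [ndtStepA, PySem.Set.empty] using ih

theorem foldl_q4 (l : List Char) :
    PySem.Set.contains (l.foldl ndtStepA ["q4"]) "q4" = l.isEmpty := by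
  cases l with
  | nil => rfl
  | cons c r =>
    have h : ndtStepA ["q4"] c = [] := by
      simp [ndtStepA, PySem.Set.empty]
    rw [List.foldl_cons, h, foldl_dead]
    rfl

theorem foldl_q2 (l : List Char) :
    PySem.Set.contains (l.foldl ndtStepA ["q2"]) "q4" = accQ2 l ∧
    PySem.Set.contains (l.foldl ndtStepA ["q2", "q3"]) "q4" = accQ2 l := by
  induction l with
  | nil => constructor <;> rfl
  | cons c r ih =>
    by_cases hf : PySem.Chars.lowerChar c = 'f' <;>
    by_cases hx : PySem.Chars.lowerChar c = 'x'
    · simp [hf] at hx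
    · have h1 : ndtStepA ["q2"] c = ["q4"] := by
        simp [ndtStepA, hf, hx, PySem.Set.empty, PySem.Set.add, PySem.Set.contains]
      have h2 : ndtStepA ["q2", "q3"] c = ["q4"] := by
        simp [ndtStepA, hf, hx, PySem.Set.empty, PySem.Set.add, PySem.Set.contains]
      constructor
      · rw [List.foldl_cons, h1, foldl_q4]; simp [accQ2, hf]
      · rw [List.foldl_cons, h2, foldl_q4]; simp [accQ2, hf]
    · have h1 : ndtStepA ["q2"] c = ["q2", "q3"] := by
        simp [ndtStepA, hf, hx, PySem.Set.empty, PySem.Set.add, PySem.Set.update, PySem.Set.contains]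
      have h2 : ndtStepA ["q2", "q3"] c = ["q2", "q3"] := by
        simp [ndtStepA, hf, hx, PySem.Set.empty, PySem.Set.add, PySem.Set.update, PySem.Set.contains]
      constructor
      · rw [List.foldl_cons, h1, ih.2]; simp [accQ2, hf, hx]
      · rw [List.foldl_cons, h2, ih.2]; simp [accQ2, hf, hx]
    · have h1 : ndtStepA ["q2"] c = [] := by
        simp [ndtStepA, hf, hx, PySem.Set.empty]
      have h2 : ndtStepA ["q2", "q3"] c = [] := by
        simp [ndtStepA, hf, hx, PySem.Set.empty]
      constructor
      · rw [List.foldl_cons, h1, foldl_dead]; simp [accQ2, hf, hx, PySem.Set.contains]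
      · rw [List.foldl_cons, h2, foldl_dead]; simp [accQ2, hf, hx, PySem.Set.contains]

theorem foldl_q1 (l : List Char) :
    PySem.Set.contains (l.foldl ndtStepA ["q1"]) "q4" = accQ1 l := by
  cases l with
  | nil => rfl
  | cons c r =>
    by_cases hg : PySem.Chars.lowerChar c = 'g'
    · have h : ndtStepA ["q1"] c = ["q2"] := by
        simp [ndtStepA, hg, PySem.Set.empty, PySem.Set.add, PySem.Set.contains]
      rw [List.foldl_cons, h, (foldl_q2 r).1]; simp [accQ1, hg]
    · have h : ndtStepA ["q1"] c = [] := by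
        simp [ndtStepA, hg, PySem.Set.empty]
      rw [List.foldl_cons, h, foldl_dead]; simp [accQ1, hg, PySem.Set.contains]

theorem foldl_q0 (l : List Char) :
    PySem.Set.contains (l.foldl ndtStepA ["q0"]) "q4" = accQ0 l := by
  cases l with
  | nil => rfl
  | cons c r =>
    by_cases hk : PySem.Chars.lowerChar c = 'k'
    · have h : ndtStepA ["q0"] c = ["q1"] := by
        simp [ndtStepA, hk, PySem.Set.empty, PySem.Set.add, PySem.Set.contains]
      rw [List.foldl_cons, h, foldl_q1]; simp [accQ0, hk]
    · have h : ndtStepA ["q0"] c = [] := by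
        simp [ndtStepA, hk, PySem.Set.empty]
      rw [List.foldl_cons, h, foldl_dead]; simp [accQ0, hk, PySem.Set.contains]

-- [z].isPrefixOf / isSuffixOf as head/last tests
theorem prefix_single (z : Char) (l : List Char) :
    [z].isPrefixOf l = (l.head? == some z) := by
  cases l <;> simp [List.isPrefixOf, eq_comm]

theorem suffix_single (z : Char) (l : List Char) :
    [z].isSuffixOf l = (l.getLast? == some z) := by
  rw [List.isSuffixOf, show [z].reverse = [z] from rfl, prefix_single,
    List.head?_reverse]

theorem beq_decide (x y : Char) : (x == y) = decide (x = y) := by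
  by_cases h : x = y <;> simp [h]

theorem deceq (x y : Char) : decide (x = y) = decide (y = x) := by
  simp [eq_comm]

-- the slice s[2:-1] of a list with two leading elements
theorem slice2neg1 (x y : Char) (m : List Char) :
    PySem.List.slice (x :: y :: m) (some 2) (some (-1)) = m.dropLast := by
  simp [PySem.List.slice, pysem, List.dropLast_eq_take]

-- accQ2 t is the "x* then f" test on the lowered tail
theorem accQ2_eq (t : List Char) :
    accQ2 t = (((t.map PySem.Chars.lowerChar).getLast? == some 'f')
      && (t.map PySem.Chars.lowerChar).dropLast.all (fun c => c == 'x')) := by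
  induction t with
  | nil => rfl
  | cons c r ih =>
    cases r with
    | nil =>
      by_cases hf : PySem.Chars.lowerChar c = 'f' <;> simp [accQ2, hf]
    | cons d s =>
      by_cases hf : PySem.Chars.lowerChar c = 'f' <;>
      by_cases hx : PySem.Chars.lowerChar c = 'x'
      · simp [hf] at hx
      · simp [accQ2, hf, ih]
      · have e1 : accQ2 (c :: d :: s) = accQ2 (d :: s) := by simp [accQ2, hf, hx]
        rw [e1, ih]
        simp [hx]
      · simp [accQ2, hf, hx]

theorem main_list (l : List Char) :
    accQ0 l = (((decide (3 ≤ ((l.map PySem.Chars.lowerChar).length : Int))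
      && [ 'k', 'g' ].isPrefixOf (l.map PySem.Chars.lowerChar))
      && ['f'].isSuffixOf (l.map PySem.Chars.lowerChar))
      && (PySem.List.slice (l.map PySem.Chars.lowerChar) (some 2) (some (-1))).all
          (fun c => c == 'x')) := by
  match l with
  | [] => rfl
  | [a] => simp [accQ0, accQ1, PySem.List.slice, PySem.List.clampIdx]
  | [a, b] =>
    by_cases hk : PySem.Chars.lowerChar a = 'k' <;>
    by_cases hg : PySem.Chars.lowerChar b = 'g' <;>
      simp [accQ0, accQ1, accQ2, hk, hg, PySem.List.slice, PySem.List.clampIdx]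
  | a :: b :: c :: r =>
    have hlen : decide (3 ≤ (((a :: b :: c :: r).map PySem.Chars.lowerChar).length : Int)) = true := by
      simp
      omega
    have hpre : ['k', 'g'].isPrefixOf ((a :: b :: c :: r).map PySem.Chars.lowerChar)
        = (decide (PySem.Chars.lowerChar a = 'k') && decide (PySem.Chars.lowerChar b = 'g')) := by
      simp [List.isPrefixOf, beq_decide, deceq]
    have hsuf : (['f'].isSuffixOf ((a :: b :: c :: r).map PySem.Chars.lowerChar))
        = (((c :: r).map PySem.Chars.lowerChar).getLast? == some 'f') := by
      rw [suffix_single]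
      simp
    have hsl : PySem.List.slice ((a :: b :: c :: r).map PySem.Chars.lowerChar)
        (some 2) (some (-1)) = ((c :: r).map PySem.Chars.lowerChar).dropLast := by
      simp only [List.map_cons]
      exact slice2neg1 _ _ _
    have hacc : accQ0 (a :: b :: c :: r)
        = (decide (PySem.Chars.lowerChar a = 'k')
            && (decide (PySem.Chars.lowerChar b = 'g') && accQ2 (c :: r))) := by
      by_cases hk : PySem.Chars.lowerChar a = 'k' <;>
      by_cases hg : PySem.Chars.lowerChar b = 'g' <;>
        simp [accQ0, accQ1, hk, hg]
    rw [hacc, accQ2_eq, hlen, hpre, hsuf, hsl]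
    generalize decide (PySem.Chars.lowerChar a = 'k') = p
    generalize decide (PySem.Chars.lowerChar b = 'g') = q
    generalize (((c :: r).map PySem.Chars.lowerChar).getLast? == some 'f') = u
    generalize (((c :: r).map PySem.Chars.lowerChar).dropLast.all (fun c => c == 'x')) = v
    cases p <;> cases q <;> cases u <;> cases v <;> rfl

-- ===== VERDICT (by name: the statement is the Claim_ definition above) =====
theorem ndt_spec : Claim_equal_ndt := by
  intro adn _
  unfold Spec_ndt ndt ndt_alt
  rw [show PySem.Set.ofList ["q0"] = ["q0"] from rfl, foldl_q0, main_list adn.toList]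
  have e1 : ("kg" : String).toList = ['k', 'g'] := rfl
  have e2 : ("f" : String).toList = ['f'] := rfl
  simp [PySem.Str.lower, PySem.Str.len, PySem.Str.startswith, PySem.Str.endswith,
    PySem.Str.slice, PySem.Chars.lower, PySem.Chars.startswith, PySem.Chars.endswith,
    e1, e2, pysem]
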